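-- pv_equiv track=rewrite | github.com/wzygxr/shuati | class051_KnapsackProblem/Code50_DivisibleGroupSums.py | divisible_group_sums
-- ===== SOURCE A (Python) =====
-- from typing import List, Tuple
--
-- def divisible_group_sums(nums: List[int], M: int, D: int) -> int:
--     """
--     动态规划解法 - 分组背包+模数运算
--
--     Args:
--         nums: 整数数组
--         M: 需要选择的数字个数
--         D: 除数
--
--     Returns:
--         int: 方案数
--     """
--     # 参数验证
--     if not nums:
--         return 1 if M == 0 else 0
--     if D == 0:
--         raise ValueError("Divisor D cannot be zero")
--     if M < 0 or M > len(nums):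
--         return 0
--
--     n = len(nums)
--
--     # 创建DP数组，使用滚动数组优化
--     dp = [[0] * D for _ in range(M + 1)]
--     dp[0][0] = 1  # 选择0个数字，和为0（模D为0）的方案数为1
--
--     # 遍历每个数字
--     for i in range(n):
--         num = nums[i]
--         mod = (num % D + D) % D  # 处理负数取模
--
--         # 倒序遍历选择数量，避免重复选择
--         for j in range(M, 0, -1):
--             # 创建临时数组保存当前状态
--             temp = dp[j][:]
--             for k in range(D):
--                 prev_mod = (k - mod + D) % D
--                 dp[j][k] += dp[j - 1][prev_mod]
--
--     return dp[M][0]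
-- ===== SOURCE B (Python) =====
-- def _comb(n, k):
--     # binomial coefficient n choose k without imports (A only imports typing)
--     if k < 0 or k > n:
--         return 0
--     c = 1
--     for i in range(k):
--         c = c * (n - i) // (i + 1)
--     return c
--
--
-- def divisible_group_sums(nums, M, D):
--     # Combinatorial algorithm: group the numbers by residue class mod D.
--     # Picking k elements out of a class of size c (all with residue r) can be
--     # done in comb(c, k) ways and contributes residue k*r mod D, so the answer
--     # is the (M, 0) coefficient of the convolution of the per-class
--     # distributions -- no per-element subset DP at all.
--     if not nums:
--         return 1 if M == 0 else 0
--     if D == 0: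
--         raise ValueError("Divisor D cannot be zero")
--     if M < 0 or M > len(nums):
--         return 0
--     counts = {}
--     for x in nums:
--         r = x % D
--         counts[r] = counts.get(r, 0) + 1
--     f = {(0, 0): 1}
--     for r, c in counts.items():
--         g = {}
--         for (j, m), w in f.items():
--             for k in range(0, min(c, M - j) + 1):
--                 key = (j + k, (m + k * r) % D)
--                 g[key] = g.get(key, 0) + w * _comb(c, k)
--         f = g
--     return f.get((M, 0), 0)
-- ===== Notes on version B (the rewrite author's own statement) =====
-- stated objective: alternative
-- what changed: A's per-element bottom-up (M+1) x D table DP is replaced by a combinatorial method: group the numbers into residue classes mod D, weight picking k elements of a class of size c by the binomial coefficient comb(c,k), and convolve the per-class (count, residue) distributions.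
-- crash fix: On non-empty nums with D < 0 and 0 <= M <= len(nums), A raises IndexError (its rows [0]*D are empty), while B returns the count of size-M subsets whose sum is divisible by D. — e.g. on divisible_group_sums([1], 1, -1): A raises IndexError, B returns 1
import Mathlib
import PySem

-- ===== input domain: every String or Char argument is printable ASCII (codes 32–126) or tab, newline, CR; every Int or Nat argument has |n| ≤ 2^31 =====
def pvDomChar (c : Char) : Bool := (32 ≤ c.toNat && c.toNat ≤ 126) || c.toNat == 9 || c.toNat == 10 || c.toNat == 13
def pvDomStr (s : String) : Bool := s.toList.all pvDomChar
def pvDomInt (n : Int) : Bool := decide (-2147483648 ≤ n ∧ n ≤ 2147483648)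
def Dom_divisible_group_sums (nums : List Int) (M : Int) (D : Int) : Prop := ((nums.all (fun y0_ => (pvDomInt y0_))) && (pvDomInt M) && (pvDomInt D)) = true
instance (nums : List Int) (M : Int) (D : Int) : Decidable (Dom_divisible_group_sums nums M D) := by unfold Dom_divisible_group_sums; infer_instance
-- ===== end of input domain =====

-- B replaces A's per-element bottom-up (M+1)×D table DP by a combinatorial method: group the
-- numbers into residue classes mod D, weight picking k elements of a class of size c by the
-- binomial coefficient comb(c, k), and convolve the per-class (count, residue) distributions;
-- equivalence is about the return value (neither program mutates its arguments).

-- ===== PORT A =====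
-- dp[j][k] read / write; every index reached under Pre_ is nonnegative and in range
def pvGet2 (dp : List (List Int)) (j k : Int) : Int :=
  PySem.List.pyGetD (PySem.List.pyGetD dp j []) k 0
def pvSet2 (dp : List (List Int)) (j k : Int) (v : Int) : List (List Int) :=
  PySem.List.pySetD dp j (PySem.List.pySetD (PySem.List.pyGetD dp j []) k v)

def divisible_group_sums (nums : List Int) (M : Int) (D : Int) : Int :=
  if nums = [] then (if M = 0 then 1 else 0)
  else if D = 0 then 0   -- Python: raise ValueError — excluded by Pre_
  else if M < 0 ∨ (nums.length : Int) < M then 0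
  else
    -- dp = [[0]*D for _ in range(M+1)]; dp[0][0] = 1
    let dp0 : List (List Int) :=
      pvSet2 (List.replicate (M.toNat + 1) (List.replicate D.toNat (0 : Int))) 0 0 1
    -- for i in range(n): num = nums[i]; …   (temp = dp[j][:] in A is dead code, never read)
    let dpF := nums.foldl (fun dp num =>
      let md := PySem.Int.mod (PySem.Int.mod num D + D) D
      (PySem.List.pyRange M 0 (-1)).foldl (fun dp2 j =>
        (PySem.List.pyRange 0 D 1).foldl (fun dp3 k =>
          pvSet2 dp3 j k
            (pvGet2 dp3 j k + pvGet2 dp3 (j - 1) (PySem.Int.mod (k - md + D) D))) dp2) dp) dp0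
    pvGet2 dpF M 0

-- ===== PORT B =====
-- _comb(n, k): multiplicative binomial coefficient (Source B avoids imports, like A)
def pvComb (n k : Int) : Int :=
  if k < 0 ∨ n < k then 0
  else (PySem.List.pyRange 0 k 1).foldl
    (fun c i => PySem.Int.floordiv (c * (n - i)) (i + 1)) 1

def divisible_group_sums_alt (nums : List Int) (M : Int) (D : Int) : Int :=
  if nums = [] then (if M = 0 then 1 else 0)
  else if D = 0 then 0   -- Python: raise ValueError — excluded by Pre_
  else if M < 0 ∨ (nums.length : Int) < M then 0
  else
    -- counts = {}; for x in nums: counts[x % D] = counts.get(x % D, 0) + 1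
    let counts : PySem.Dict Int Int :=
      nums.foldl (fun d x => d.modify (PySem.Int.mod x D) 0 (· + 1)) PySem.Dict.empty
    -- f = {(0,0): 1}; for r, c in counts.items(): … convolve with the class distribution
    let f := counts.items.foldl (fun f rc =>
      f.items.foldl (fun g p =>
        (PySem.List.pyRange 0 (min rc.2 (M - p.1.1) + 1) 1).foldl (fun g k =>
          g.modify (p.1.1 + k, PySem.Int.mod (p.1.2 + k * rc.1) D) 0
            (· + p.2 * pvComb rc.2 k)) g)
        (PySem.Dict.ofList []))
      (PySem.Dict.ofList [(((0 : Int), (0 : Int)), (1 : Int))])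
    f.getD (M, 0) 0

-- ===== PRECONDITION & SPEC =====
-- Pre_ excludes exactly the inputs where A raises: D = 0 with non-empty nums (ValueError), and
-- D < 0 with non-empty nums and 0 ≤ M ≤ len(nums) (IndexError while building the table).
def Pre_divisible_group_sums (nums : List Int) (M : Int) (D : Int) : Prop :=
  nums = [] ∨ (D ≠ 0 ∧ (0 < D ∨ M < 0 ∨ (nums.length : Int) < M))
instance (nums : List Int) (M : Int) (D : Int) : Decidable (Pre_divisible_group_sums nums M D) := by
  unfold Pre_divisible_group_sums; infer_instance

def pvWitness_divisible_group_sums : List Int × Int × Int := ([1, 2, 3], 2, 3)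

-- On non-empty nums with D < 0 and 0 ≤ M ≤ len(nums), A raises IndexError (its rows [0]*D are
-- empty), while B returns the count of size-M subsets whose sum is divisible by D.
def Raises_divisible_group_sums (nums : List Int) (M : Int) (D : Int) : Prop :=
  nums ≠ [] ∧ D < 0 ∧ 0 ≤ M ∧ M ≤ (nums.length : Int)
instance (nums : List Int) (M : Int) (D : Int) : Decidable (Raises_divisible_group_sums nums M D) := by
  unfold Raises_divisible_group_sums; infer_instance
def pvRaiseWitness_divisible_group_sums : List Int × Int × Int := ([1], 1, -1)
def pvRaiseWitnessOut_divisible_group_sums : Int := 1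

def Spec_divisible_group_sums (nums : List Int) (M : Int) (D : Int) (out : Int) : Prop :=
  out = divisible_group_sums_alt nums M D
instance (nums : List Int) (M : Int) (D : Int) (out : Int) : Decidable (Spec_divisible_group_sums nums M D out) := by
  unfold Spec_divisible_group_sums; infer_instance

-- ===== CLAIM (what is proved, stated in full; the proofs are below) =====
def Claim_equal_divisible_group_sums : Prop := ∀ (nums : List Int) (M : Int) (D : Int), Dom_divisible_group_sums nums M D → Pre_divisible_group_sums nums M D → Spec_divisible_group_sums nums M D (divisible_group_sums nums M D)
def Claim_raises_divisible_group_sums : Prop := (∀ (nums : List Int) (M : Int) (D : Int), Dom_divisible_group_sums nums M D → Raises_divisible_group_sums nums M D → ¬ Pre_divisible_group_sums nums M D) ∧ (Dom_divisible_group_sums (pvRaiseWitness_divisible_group_sums.1) (pvRaiseWitness_divisible_group_sums.2.1) (pvRaiseWitness_divisible_group_sums.2.2) ∧ Raises_divisible_group_sums (pvRaiseWitness_divisible_group_sums.1) (pvRaiseWitness_divisible_group_sums.2.1) (pvRaiseWitness_divisible_group_sums.2.2) ∧ divisible_group_sums_alt (pvRaiseWitness_divisible_group_sums.1) (pvRaiseWitness_divisible_group_sums.2.1)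 (pvRaiseWitness_divisible_group_sums.2.2) = pvRaiseWitnessOut_divisible_group_sums)

-- ===== LEMMAS AND PROOFS =====

-- the common yardstick: number of sublists of l of length j whose sum has residue k mod D
def cnt (D : Int) (l : List Int) (j k : Int) : Int :=
  ((l.sublists.countP (fun s => decide (((s.length : Int) = j) ∧ s.sum % D = k))) : Nat)

lemma cnt_nil (D j k : Int) : cnt D [] j k = if j = 0 ∧ k = 0 then 1 else 0 := by
  simp only [cnt, List.sublists_nil, List.countP_cons, List.countP_nil, List.length_nil,
    List.sum_nil, Int.zero_emod, Nat.cast_zero, zero_add, decide_eq_true_eq]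
  by_cases h : j = 0 ∧ k = 0
  · rw [if_pos (by exact ⟨h.1.symm, h.2.symm⟩), if_pos h]
    simp
  · rw [if_neg (fun hh => h ⟨hh.1.symm, hh.2.symm⟩), if_neg h]
    simp

lemma cnt_neg (D : Int) (l : List Int) (j k : Int) (h : j < 0) : cnt D l j k = 0 := by
  simp only [cnt]
  rw [List.countP_eq_zero.2]
  · rfl
  intro s _
  simp only [decide_eq_true_eq, not_and]
  intro hl; omega

lemma mod_shift (D s x k : Int) (hD : 0 < D) (h0 : 0 ≤ k) (hk : k < D) :
    ((s + x) % D = k ↔ s % D = (k - x) % D) := by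
  constructor
  · intro h
    rw [← h]
    conv_rhs => rw [Int.sub_emod, Int.emod_emod_of_dvd _ dvd_rfl, ← Int.sub_emod]
    simp
  · intro h
    have h1 : (s + x) % D = (s % D + x) % D := by
      conv_lhs => rw [Int.add_emod]
      conv_rhs => rw [Int.add_emod, Int.emod_emod_of_dvd _ dvd_rfl]
    have h2 : ((k - x) + x) % D = k := by
      simpa using Int.emod_eq_of_lt h0 hk
    rw [h1, h]
    conv_lhs => rw [Int.add_emod, Int.emod_emod_of_dvd _ dvd_rfl, ← Int.add_emod]
    exact h2

lemma cnt_concat (D : Int) (l : List Int) (x j k : Int) (hD : 0 < D) (h0 : 0 ≤ k) (hk : k < D) :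
    cnt D (l ++ [x]) j k = cnt D l j k + cnt D l (j - 1) ((k - x) % D) := by
  simp only [cnt]
  rw [List.sublists_concat, List.countP_append, List.countP_map]
  have : ∀ s : List Int,
      ((fun s => decide (((s.length : Int) = j) ∧ s.sum % D = k)) ∘ (fun t => t ++ [x])) s
      = (fun s => decide (((s.length : Int) = j - 1) ∧ s.sum % D = (k - x) % D)) s := by
    intro s
    simp only [Function.comp, List.length_append, List.sum_append, List.length_cons,
      List.length_nil, List.sum_cons, List.sum_nil, add_zero, decide_eq_decide]
    constructor
    · rintro ⟨h1, h2⟩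
      refine ⟨by push_cast at h1 ⊢; omega, ?_⟩
      exact (mod_shift D s.sum x k hD h0 hk).1 h2
    · rintro ⟨h1, h2⟩
      refine ⟨by push_cast at h1 ⊢; omega, ?_⟩
      exact (mod_shift D s.sum x k hD h0 hk).2 h2
  rw [funext this]
  push_cast
  ring

-- ===== A-side: the table dp after processing a prefix is the cnt table =====

def pvRow (D : Int) (f : Nat → Int) : List Int := (List.range D.toNat).map f

def pvTbl (D : Int) (Mn : Nat) (l : List Int) : List (List Int) :=
  (List.range (Mn + 1)).map (fun (i : Nat) => pvRow D (fun k => cnt D l (i : Int) (k : Int)))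

def pvMixed (D : Int) (Mn : Nat) (l : List Int) (x : Int) (t : Nat) : List (List Int) :=
  (List.range (Mn + 1)).map (fun i =>
    pvRow D (fun k => cnt D (if i ≤ t then l else l ++ [x]) (i : Int) (k : Int)))

lemma set_of_getElem? {α : Type} (l : List α) (i : Nat) (v : α) (h : l[i]? = some v) :
    l.set i v = l := by
  apply List.ext_getElem?
  intro j
  rw [List.getElem?_set]
  split_ifs with h1 h2
  · subst h1; exact h.symm
  · subst h1
    rw [List.getElem?_eq_none (by omega)] at h
    exact absurd h (by simp)
  · rfl

lemma set_map_range {β : Type} (n a : Nat) (f : Nat → β) (v : β) (ha : a < n) :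
    ((List.range n).map f).set a v = (List.range n).map (fun k => if k = a then v else f k) := by
  apply List.ext_getElem (by simp)
  intro j hj1 hj2
  simp only [List.getElem_set, List.getElem_map, List.getElem_range]
  by_cases h : a = j
  · subst h; simp
  · rw [if_neg h, if_neg (fun hh => h hh.symm)]

lemma prev_nonneg (D md k : Int) (hD : 0 < D) : 0 ≤ PySem.Int.mod (k - md + D) D :=
  PySem.Int.mod_nonneg _ hD

lemma prev_lt (D md k : Int) (hD : 0 < D) : PySem.Int.mod (k - md + D) D < D :=
  PySem.Int.mod_lt _ hD

lemma md_eq (D x : Int) (hD : 0 < D) :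
    PySem.Int.mod (PySem.Int.mod x D + D) D = x % D := by
  rw [PySem.Int.mod_eq_emod_of_pos hD, PySem.Int.mod_eq_emod_of_pos hD,
    Int.add_emod_right, Int.emod_emod_of_dvd _ dvd_rfl]

lemma prev_eq (D x k : Int) (hD : 0 < D) :
    PySem.Int.mod (k - PySem.Int.mod (PySem.Int.mod x D + D) D + D) D = (k - x) % D := by
  rw [md_eq D x hD, PySem.Int.mod_eq_emod_of_pos hD, Int.add_emod_right]
  conv_lhs => rw [Int.sub_emod, Int.emod_emod_of_dvd _ dvd_rfl, ← Int.sub_emod]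

lemma inner_fold (D md : Int) (hD : 0 < D) (fu fv : Nat → Int) (jN : Nat) (hj : 1 ≤ jN) :
    ∀ (m a : Nat), a + m = D.toNat →
    ∀ (dp : List (List Int)), jN < dp.length →
    dp[jN]? = some (pvRow D (fun k =>
        if k < a then fu k + fv ((PySem.Int.mod ((k : Int) - md + D) D).toNat) else fu k)) →
    dp[jN - 1]? = some (pvRow D fv) →
    (PySem.List.pyRange (a : Int) D 1).foldl (fun dp3 k =>
        pvSet2 dp3 (jN : Int) k
          (pvGet2 dp3 (jN : Int) k + pvGet2 dp3 ((jN : Int) - 1) (PySem.Int.mod (k - md + D) D))) dp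
      = dp.set jN (pvRow D (fun k => fu k + fv ((PySem.Int.mod ((k : Int) - md + D) D).toNat))) := by
  intro m
  induction m with
  | zero =>
    intro a ha dp hlen hrow hprev
    have haD : a = D.toNat := by omega
    subst haD
    rw [PySem.List.pyRange_one_eq_nil (by omega)]
    simp only [List.foldl_nil]
    have : pvRow D (fun k =>
        if k < D.toNat then fu k + fv ((PySem.Int.mod ((k : Int) - md + D) D).toNat) else fu k)
        = pvRow D (fun k => fu k + fv ((PySem.Int.mod ((k : Int) - md + D) D).toNat)) := by
      unfold pvRow
      apply List.map_congr_left
      intro k hk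
      rw [if_pos (List.mem_range.1 hk)]
    rw [this] at hrow
    exact (set_of_getElem? dp jN _ hrow).symm
  | succ m ih =>
    intro a ha dp hlen hrow hprev
    have haD : a < D.toNat := by omega
    have haDi : (a : Int) < D := by omega
    rw [PySem.List.pyRange_one_cons haDi]
    simp only [List.foldl_cons]
    have hgetrow : PySem.List.pyGetD dp (jN : Int) [] = pvRow D (fun k =>
        if k < a then fu k + fv ((PySem.Int.mod ((k : Int) - md + D) D).toNat) else fu k) := by
      rw [PySem.List.pyGetD_natCast, List.getD_eq_getElem?_getD, hrow]; rfl
    have hj1cast : (jN : Int) - 1 = ((jN - 1 : Nat) : Int) := by omega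
    have hgetprev : PySem.List.pyGetD dp ((jN : Int) - 1) [] = pvRow D fv := by
      rw [hj1cast, PySem.List.pyGetD_natCast, List.getD_eq_getElem?_getD, hprev]; rfl
    have hga : pvGet2 dp (jN : Int) (a : Int) = fu a := by
      unfold pvGet2
      rw [hgetrow, PySem.List.pyGetD_natCast, pvRow, PySem.List.getD_map_range _ _ _ _ haD,
        if_neg (by omega)]
    have hprevnn := prev_nonneg D md (a : Int) hD
    have hprevlt := prev_lt D md (a : Int) hD
    have hprevtn : (PySem.Int.mod ((a : Int) - md + D) D).toNat < D.toNat := by omega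
    have hgb : pvGet2 dp ((jN : Int) - 1) (PySem.Int.mod ((a : Int) - md + D) D)
        = fv ((PySem.Int.mod ((a : Int) - md + D) D).toNat) := by
      unfold pvGet2
      rw [hgetprev, PySem.List.pyGetD_of_nonneg _ _ hprevnn, pvRow, List.getD_eq_getElem?_getD,
        List.getElem?_map, List.getElem?_range hprevtn]
      rfl
    set w : Int := fu a + fv ((PySem.Int.mod ((a : Int) - md + D) D).toNat) with hw
    have hbody : pvSet2 dp (jN : Int) (a : Int)
          (pvGet2 dp (jN : Int) (a : Int) +
            pvGet2 dp ((jN : Int) - 1) (PySem.Int.mod ((a : Int) - md + D) D))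
        = dp.set jN (pvRow D (fun k =>
            if k < a + 1 then fu k + fv ((PySem.Int.mod ((k : Int) - md + D) D).toNat) else fu k)) := by
      rw [hga, hgb]
      unfold pvSet2
      rw [hgetrow, PySem.List.pySetD_of_nonneg _ _ (by positivity),
        PySem.List.pySetD_of_nonneg _ _ (by positivity)]
      simp only [Int.toNat_natCast]
      rw [pvRow, set_map_range _ _ _ _ haD]
      congr 1
      apply List.map_congr_left
      intro k hk
      by_cases hka : k = a
      · subst hka
        rw [if_pos rfl, if_pos (by omega)]
      · rw [if_neg hka]
        by_cases hklt : k < a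
        · rw [if_pos hklt, if_pos (by omega)]
        · rw [if_neg hklt, if_neg (by omega)]
    rw [hbody]
    have hstep := ih (a + 1) (by omega) (dp.set jN (pvRow D (fun k =>
        if k < a + 1 then fu k + fv ((PySem.Int.mod ((k : Int) - md + D) D).toNat) else fu k)))
      (by simpa using hlen)
      (by rw [List.getElem?_set_self (by simpa using hlen)])
      (by rw [List.getElem?_set]; rw [if_neg (by omega)]; exact hprev)
    have hcast : ((a : Int) + 1) = (((a + 1 : Nat)) : Int) := by push_cast; ring
    rw [hcast, hstep, List.set_set]

lemma outer_fold (D : Int) (hD : 0 < D) (Mn : Nat) (l : List Int) (x : Int) :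
    ∀ n : Nat, n ≤ Mn →
    (PySem.List.pyRange (n : Int) 0 (-1)).foldl (fun dp2 j =>
        (PySem.List.pyRange 0 D 1).foldl (fun dp3 k =>
          pvSet2 dp3 j k
            (pvGet2 dp3 j k + pvGet2 dp3 (j - 1)
              (PySem.Int.mod (k - PySem.Int.mod (PySem.Int.mod x D + D) D + D) D))) dp2)
      (pvMixed D Mn l x n)
      = pvMixed D Mn l x 0 := by
  intro n
  induction n with
  | zero =>
    intro _
    rw [PySem.List.pyRange_neg_one_eq_nil (by omega)]
    simp
  | succ n ih =>
    intro hn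
    rw [PySem.List.pyRange_neg_one_cons (by omega)]
    simp only [List.foldl_cons]
    set md := PySem.Int.mod (PySem.Int.mod x D + D) D with hmd
    have hlen : n + 1 < (pvMixed D Mn l x (n + 1)).length := by
      simp [pvMixed]; omega
    have hstep := inner_fold D md hD
      (fun k => cnt D l ((n + 1 : Nat) : Int) (k : Int))
      (fun k => cnt D l (n : Nat) (k : Int)) (n + 1) (by omega) D.toNat 0 (by omega)
      (pvMixed D Mn l x (n + 1)) hlen
      (by
        simp only [pvMixed, List.getElem?_map, List.getElem?_range (by omega : n + 1 < Mn + 1),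
          Option.map_some, le_refl, if_true, Nat.not_lt_zero, if_false])
      (by
        simp only [Nat.add_sub_cancel, pvMixed, List.getElem?_map,
          List.getElem?_range (by omega : n < Mn + 1), Option.map_some]
        rw [if_pos (by omega)])
    have hcast2 : ((n + 1 : Nat) : Int) - 1 = (n : Int) := by push_cast; ring
    simp only [Nat.cast_zero] at hstep
    rw [hstep, hcast2]
    have hmix : (pvMixed D Mn l x (n + 1)).set (n + 1)
        (pvRow D (fun k => cnt D l ((n + 1 : Nat) : Int) (k : Int)
          + cnt D l (n : Nat) (((PySem.Int.mod ((k : Int) - md + D) D).toNat : Nat) : Int)))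
        = pvMixed D Mn l x n := by
      unfold pvMixed
      rw [set_map_range _ _ _ _ (by omega)]
      apply List.map_congr_left
      intro i hi
      by_cases hieq : i = n + 1
      · subst hieq
        rw [if_pos rfl, if_neg (by omega)]
        unfold pvRow
        apply List.map_congr_left
        intro k hk
        have hk' : k < D.toNat := List.mem_range.1 hk
        have h0k : (0 : Int) ≤ (k : Int) := by positivity
        have hkD : (k : Int) < D := by omega
        rw [cnt_concat D l x _ _ hD h0k hkD]
        congr 2
        · push_cast; ring
        · have hnn := prev_nonneg D md (k : Int) hD
          have : ((PySem.Int.mod ((k : Int) - md + D) D).toNat : Int)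
              = PySem.Int.mod ((k : Int) - md + D) D := Int.toNat_of_nonneg hnn
          rw [this, hmd, prev_eq D x (k : Int) hD]
      · rw [if_neg hieq]
        by_cases hle : i ≤ n
        · rw [if_pos hle, if_pos (by omega)]
        · rw [if_neg hle, if_neg (by omega)]
    rw [hmix]
    exact ih (by omega)

lemma step_A (D : Int) (hD : 0 < D) (Mn : Nat) (l : List Int) (x : Int) :
    (PySem.List.pyRange ((Mn : Int)) 0 (-1)).foldl (fun dp2 j =>
        (PySem.List.pyRange 0 D 1).foldl (fun dp3 k =>
          pvSet2 dp3 j k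
            (pvGet2 dp3 j k + pvGet2 dp3 (j - 1)
              (PySem.Int.mod (k - PySem.Int.mod (PySem.Int.mod x D + D) D + D) D))) dp2)
      (pvTbl D Mn l)
      = pvTbl D Mn (l ++ [x]) := by
  have h1 : pvTbl D Mn l = pvMixed D Mn l x Mn := by
    unfold pvTbl pvMixed
    apply List.map_congr_left
    intro i hi
    have : i ≤ Mn := by have := List.mem_range.1 hi; omega
    rw [if_pos this]
  have h2 : pvMixed D Mn l x 0 = pvTbl D Mn (l ++ [x]) := by
    unfold pvTbl pvMixed
    apply List.map_congr_left
    intro i _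
    by_cases hi0 : i = 0
    · subst hi0
      rw [if_pos (le_refl 0)]
      unfold pvRow
      apply List.map_congr_left
      intro k hk
      have hk' : k < D.toNat := List.mem_range.1 hk
      simp only [Nat.cast_zero]
      rw [cnt_concat D l x 0 (k : Int) hD (by positivity) (by omega),
        cnt_neg D l (0 - 1) (((k : Int) - x) % D) (by omega)]
      ring
    · rw [if_neg (by omega)]
  rw [h1, outer_fold D hD Mn l x Mn (le_refl Mn), h2]

lemma fold_A (D : Int) (hD : 0 < D) (Mn : Nat) :
    ∀ (rest pre : List Int),
    rest.foldl (fun dp num =>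
      (PySem.List.pyRange ((Mn : Int)) 0 (-1)).foldl (fun dp2 j =>
        (PySem.List.pyRange 0 D 1).foldl (fun dp3 k =>
          pvSet2 dp3 j k
            (pvGet2 dp3 j k + pvGet2 dp3 (j - 1)
              (PySem.Int.mod (k - PySem.Int.mod (PySem.Int.mod num D + D) D + D) D))) dp2) dp)
      (pvTbl D Mn pre)
      = pvTbl D Mn (pre ++ rest) := by
  intro rest
  induction rest with
  | nil => intro pre; simp
  | cons x rest ih =>
    intro pre
    simp only [List.foldl_cons]
    rw [step_A D hD Mn pre x, ih (pre ++ [x])]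
    simp

lemma A_init (Mn : Nat) (D : Int) (hD : 0 < D) :
    pvSet2 (List.replicate (Mn + 1) (List.replicate D.toNat (0 : Int))) 0 0 1
      = pvTbl D Mn [] := by
  unfold pvSet2
  rw [PySem.List.pyGetD_zero]
  have hrow0 : (List.replicate (Mn + 1) (List.replicate D.toNat (0 : Int))).getD 0 []
      = List.replicate D.toNat (0 : Int) := by
    rw [List.replicate_succ]; rfl
  rw [hrow0, PySem.List.pySetD_of_nonneg _ _ (le_refl 0),
    PySem.List.pySetD_of_nonneg _ _ (le_refl 0)]
  simp only [Int.toNat_zero]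
  apply List.ext_getElem (by simp [pvTbl, pvRow])
  intro i hi1 hi2
  simp only [List.length_set, List.length_replicate] at hi1
  rw [List.getElem_set]
  unfold pvTbl
  rw [List.getElem_map, List.getElem_range]
  by_cases hi0 : 0 = i
  · rw [if_pos hi0]
    subst hi0
    apply List.ext_getElem (by simp [pvRow])
    intro k hk1 hk2
    simp only [List.length_set, List.length_replicate] at hk1
    rw [List.getElem_set]
    unfold pvRow
    rw [List.getElem_map, List.getElem_range, cnt_nil]
    by_cases hk0 : 0 = k
    · rw [if_pos hk0, if_pos (by constructor <;> simp [← hk0])]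
    · rw [if_neg hk0, if_neg (by intro ⟨_, h2⟩; exact hk0 (by exact_mod_cast h2.symm)),
        List.getElem_replicate]
  · rw [if_neg hi0, List.getElem_replicate]
    apply List.ext_getElem (by simp [pvRow])
    intro k hk1 hk2
    rw [List.getElem_replicate]
    unfold pvRow
    rw [List.getElem_map, List.getElem_range, cnt_nil,
      if_neg (by intro ⟨h1, _⟩; exact hi0 (by exact_mod_cast h1.symm))]

lemma tbl_read (D : Int) (hD : 0 < D) (Mn : Nat) (l : List Int) :
    pvGet2 (pvTbl D Mn l) ((Mn : Int)) 0 = cnt D l (Mn : Int) 0 := by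
  unfold pvGet2 pvTbl
  rw [PySem.List.pyGetD_natCast, List.getD_eq_getElem?_getD, List.getElem?_map,
    List.getElem?_range (by omega : Mn < Mn + 1), Option.map_some, Option.getD_some,
    PySem.List.pyGetD_zero]
  unfold pvRow
  rw [List.getD_eq_getElem?_getD, List.getElem?_map,
    List.getElem?_range (by omega : 0 < D.toNat), Option.map_some, Option.getD_some,
    Nat.cast_zero]

-- ===== B-side lemmas =====

lemma emod_sub_right (D u v : Int) : ((u % D) - v) % D = (u - v) % D := by
  conv_lhs => rw [Int.sub_emod, Int.emod_emod_of_dvd _ dvd_rfl, ← Int.sub_emod]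

lemma sum_map_emod (D : Int) (s : List Int) : (s.map (fun x => x % D)).sum % D = s.sum % D := by
  induction s with
  | nil => simp
  | cons x s ih =>
    simp only [List.map_cons, List.sum_cons]
    rw [Int.add_emod, ih, Int.emod_emod_of_dvd _ dvd_rfl, ← Int.add_emod]

-- pvComb computes the binomial coefficient
lemma pvComb_aux (n : Nat) : ∀ (m j : Nat), j + m ≤ n →
    (PySem.List.pyRange (j : Int) ((j + m : Nat) : Int) 1).foldl
      (fun c i => PySem.Int.floordiv (c * ((n : Int) - i)) (i + 1)) ((n.choose j : Nat) : Int)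
    = ((n.choose (j + m) : Nat) : Int) := by
  intro m
  induction m with
  | zero =>
    intro j hj
    rw [Nat.add_zero, PySem.List.pyRange_one_eq_nil (le_refl _)]
    simp
  | succ m ih =>
    intro j hj
    rw [PySem.List.pyRange_one_cons (show (j : Int) < ((j + (m + 1) : Nat) : Int) by omega)]
    simp only [List.foldl_cons]
    have hstep : PySem.Int.floordiv (((n.choose j : Nat) : Int) * ((n : Int) - (j : Int))) ((j : Int) + 1)
        = ((n.choose (j + 1) : Nat) : Int) := by
      have e1 : ((n : Int) - (j : Int)) = (((n - j : Nat)) : Int) := by omega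
      have e2 : ((j : Int) + 1) = (((j + 1 : Nat)) : Int) := by omega
      rw [e1, e2, ← Nat.cast_mul, PySem.Int.floordiv_natCast]
      congr 1
      rw [← Nat.choose_succ_right_eq]
      exact Nat.mul_div_cancel _ (by omega)
    have e2 : ((j : Int) + 1) = (((j + 1 : Nat)) : Int) := by omega
    have e3 : ((j + (m + 1) : Nat) : Int) = (((j + 1) + m : Nat) : Int) := by omega
    rw [hstep, e2, e3, ih (j + 1) (by omega), show (j + 1) + m = j + (m + 1) from by omega]

lemma pvComb_eq_choose (n k : Nat) (h : k ≤ n) :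
    pvComb (n : Int) (k : Int) = ((n.choose k : Nat) : Int) := by
  unfold pvComb
  rw [if_neg (by push_cast; omega)]
  have := pvComb_aux n k 0 (by omega)
  simpa using this

-- counting over the residue list is the same as counting over the original list
lemma cnt_map_res (D : Int) (l : List Int) (j m : Int) :
    cnt D (l.map (fun x => x % D)) j m = cnt D l j m := by
  simp only [cnt]
  rw [List.sublists_map, List.countP_map]
  have h : ∀ s ∈ l.sublists,
      (((fun s => decide (((s.length : Int) = j) ∧ s.sum % D = m)) ∘ List.map (fun x => x % D)) s)
      = ((fun s => decide (((s.length : Int) = j) ∧ s.sum % D = m)) s) := by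
    intro s _
    simp only [Function.comp, List.length_map, decide_eq_decide]
    rw [sum_map_emod]
  rw [List.countP_congr (fun s hs => by rw [h s hs])]

lemma cnt_cons (D : Int) (l : List Int) (x j k : Int) (hD : 0 < D) (h0 : 0 ≤ k) (hk : k < D) :
    cnt D (x :: l) j k = cnt D l j k + cnt D l (j - 1) ((k - x) % D) := by
  simp only [cnt]
  set p : List Int → Bool := fun s => decide (((s.length : Int) = j) ∧ s.sum % D = k) with hp
  set q : List Int → Bool := fun s => decide (((s.length : Int) = j - 1) ∧ s.sum % D = (k - x) % D) with hq
  have key : (x :: l).sublists.countP p = l.sublists.countP p + l.sublists.countP q := by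
    rw [(List.sublists_perm_sublists' (x :: l)).countP_eq p, List.sublists'_cons,
      List.countP_append, List.countP_map,
      ← (List.sublists_perm_sublists' l).countP_eq p,
      ← (List.sublists_perm_sublists' l).countP_eq (p ∘ (x :: ·))]
    congr 1
    apply List.countP_congr
    intro s _
    simp only [Function.comp, hp, hq, List.length_cons, List.sum_cons, decide_eq_true_eq]
    constructor
    · rintro ⟨a, b⟩
      refine ⟨by push_cast at a ⊢; omega, ?_⟩
      exact (mod_shift D s.sum x k hD h0 hk).1 (by rw [← b]; ring_nf)
    · rintro ⟨a, b⟩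
      refine ⟨by push_cast at a ⊢; omega, ?_⟩
      rw [show x + s.sum = s.sum + x by ring]
      exact (mod_shift D s.sum x k hD h0 hk).2 b
  rw [key]
  push_cast
  ring

-- cnt is invariant under permutation of the list
lemma cnt_perm (D : Int) (hD : 0 < D) {l l' : List Int} (h : l.Perm l') :
    ∀ j m : Int, 0 ≤ m → m < D → cnt D l j m = cnt D l' j m := by
  induction h with
  | nil => intro j m _ _; rfl
  | cons x h ih =>
    intro j m h0 hm
    rw [cnt_cons D _ x j m hD h0 hm, cnt_cons D _ x j m hD h0 hm,
      ih j m h0 hm, ih (j - 1) ((m - x) % D) (Int.emod_nonneg _ (by omega)) (Int.emod_lt_of_pos _ hD)]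
  | swap a b l =>
    intro j m h0 hm
    have hnn : ∀ u : Int, 0 ≤ u % D := fun u => Int.emod_nonneg _ (by omega)
    have hlt : ∀ u : Int, u % D < D := fun u => Int.emod_lt_of_pos _ hD
    have e1 := cnt_cons D (a :: l) b j m hD h0 hm
    have e2 := cnt_cons D l a j m hD h0 hm
    have e3 := cnt_cons D l a (j - 1) ((m - b) % D) hD (hnn _) (hlt _)
    have e4 := cnt_cons D (b :: l) a j m hD h0 hm
    have e5 := cnt_cons D l b j m hD h0 hm
    have e6 := cnt_cons D l b (j - 1) ((m - a) % D) hD (hnn _) (hlt _)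
    rw [e1, e2, e3, e4, e5, e6]
    rw [emod_sub_right, emod_sub_right, show m - b - a = m - a - b from by ring]
    ring
  | trans h1 h2 ih1 ih2 =>
    intro j m h0 hm
    rw [ih1 j m h0 hm, ih2 j m h0 hm]

-- list sum over range as a Finset sum
lemma sum_map_range_eq (n : Nat) (f : Nat → Int) :
    ((List.range n).map f).sum = ∑ k ∈ Finset.range n, f k := by
  induction n with
  | zero => simp
  | succ n ih => rw [List.range_succ, List.map_append, List.sum_append, Finset.sum_range_succ, ih]; simp

-- appending a whole residue class convolves with the binomial distribution
lemma cnt_class (D : Int) (hD : 0 < D) (r : Int) :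
    ∀ (c : Nat) (L : List Int) (j m : Int), 0 ≤ m → m < D →
    cnt D (L ++ List.replicate c r) j m
      = ((List.range (c + 1)).map (fun (k : Nat) =>
          cnt D L (j - (k : Int)) ((m - (k : Int) * r) % D) * ((c.choose k : Nat) : Int))).sum := by
  intro c
  induction c with
  | zero =>
    intro L j m h0 hm
    rw [show (0 : Nat) + 1 = 1 from rfl, List.range_one]
    simp only [List.replicate_zero, List.append_nil, List.map_cons, List.map_nil, List.sum_cons,
      List.sum_nil, Nat.cast_zero, Nat.choose_self, Nat.cast_one, mul_one, zero_mul, sub_zero,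
      add_zero]
    rw [Int.emod_eq_of_lt h0 hm]
  | succ c ih =>
    intro L j m h0 hm
    have hnn : ∀ u : Int, 0 ≤ u % D := fun u => Int.emod_nonneg _ (by omega)
    have hlt : ∀ u : Int, u % D < D := fun u => Int.emod_lt_of_pos _ hD
    rw [List.replicate_succ', ← List.append_assoc, cnt_concat D _ r j m hD h0 hm,
      ih L j m h0 hm, ih L (j - 1) ((m - r) % D) (hnn _) (hlt _),
      sum_map_range_eq, sum_map_range_eq, sum_map_range_eq]
    have t : Nat → Int := fun k => cnt D L (j - (k : Int)) ((m - (k : Int) * r) % D)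
    have h2 : ∑ k ∈ Finset.range (c + 1),
        cnt D L (j - 1 - (k : Int)) (((m - r) % D - (k : Int) * r) % D) * ((c.choose k : Nat) : Int)
        = ∑ k ∈ Finset.range (c + 1),
          cnt D L (j - ((k + 1 : Nat) : Int)) ((m - ((k + 1 : Nat) : Int) * r) % D)
            * ((c.choose k : Nat) : Int) := by
      apply Finset.sum_congr rfl
      intro k _
      have hresid : ((m - r) % D - (k : Int) * r) % D = (m - ((k + 1 : Nat) : Int) * r) % D := by
        rw [emod_sub_right]
        congr 1
        push_cast
        ring
      have hsub : j - 1 - (k : Int) = j - ((k + 1 : Nat) : Int) := by push_cast; ring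
      rw [hresid, hsub]
    rw [h2]
    have hrhs : ∑ k ∈ Finset.range (c + 1 + 1),
          cnt D L (j - (k : Int)) ((m - (k : Int) * r) % D) * (((c + 1).choose k : Nat) : Int)
        = ∑ k ∈ Finset.range (c + 1),
            cnt D L (j - ((k + 1 : Nat) : Int)) ((m - ((k + 1 : Nat) : Int) * r) % D)
              * (((c + 1).choose (k + 1) : Nat) : Int)
          + cnt D L (j - ((0 : Nat) : Int)) ((m - ((0 : Nat) : Int) * r) % D)
              * (((c + 1).choose 0 : Nat) : Int) :=
      Finset.sum_range_succ' _ (c + 1)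
    have hpas : ∑ k ∈ Finset.range (c + 1),
          cnt D L (j - ((k + 1 : Nat) : Int)) ((m - ((k + 1 : Nat) : Int) * r) % D)
            * (((c + 1).choose (k + 1) : Nat) : Int)
        = ∑ k ∈ Finset.range (c + 1),
            (cnt D L (j - ((k + 1 : Nat) : Int)) ((m - ((k + 1 : Nat) : Int) * r) % D)
                * ((c.choose k : Nat) : Int)
              + cnt D L (j - ((k + 1 : Nat) : Int)) ((m - ((k + 1 : Nat) : Int) * r) % D)
                * ((c.choose (k + 1) : Nat) : Int)) := by
      apply Finset.sum_congr rfl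
      intro k _
      rw [Nat.choose_succ_succ]
      push_cast
      ring
    have hshift : ∑ k ∈ Finset.range (c + 1),
          cnt D L (j - ((k + 1 : Nat) : Int)) ((m - ((k + 1 : Nat) : Int) * r) % D)
            * ((c.choose (k + 1) : Nat) : Int)
          + cnt D L (j - ((0 : Nat) : Int)) ((m - ((0 : Nat) : Int) * r) % D)
            * ((c.choose 0 : Nat) : Int)
        = ∑ k ∈ Finset.range (c + 1),
            cnt D L (j - (k : Int)) ((m - (k : Int) * r) % D) * ((c.choose k : Nat) : Int) := by
      rw [← Finset.sum_range_succ'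
        (fun k => cnt D L (j - (k : Int)) ((m - (k : Int) * r) % D) * ((c.choose k : Nat) : Int))
        (c + 1), Finset.sum_range_succ]
      simp [Nat.choose_eq_zero_of_lt (by omega : c < c + 1)]
    rw [hrhs, hpas, Finset.sum_add_distrib]
    have hch0 : (((c + 1).choose 0 : Nat) : Int) = ((c.choose 0 : Nat) : Int) := by simp
    rw [hch0]
    linarith [hshift]

-- ===== dict-fold algebra =====

lemma getD_foldl_modify_sum {α : Type} (key : α → (Int × Int)) (amt : α → Int) :
    ∀ (ps : List α) (d : PySem.Dict (Int × Int) Int) (q : Int × Int),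
    (ps.foldl (fun nxt a => nxt.modify (key a) 0 (· + amt a)) d).getD q 0
      = d.getD q 0 + ((ps.filter (fun a => decide (key a = q))).map amt).sum := by
  intro ps
  induction ps with
  | nil => intro d q; simp
  | cons p ps ih =>
    intro d q
    simp only [List.foldl_cons, List.filter_cons]
    rw [ih]
    by_cases h : key p = q
    · rw [if_pos (by simpa using h)]
      simp only [List.map_cons, List.sum_cons]
      rw [PySem.Dict.getD_modify, if_pos h.symm, h]
      ring
    · rw [if_neg (by simpa using h)]
      rw [PySem.Dict.getD_modify, if_neg (fun hh => h hh.symm)]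

lemma filter_fst_eq_singleton {β : Type} [DecidableEq β] :
    ∀ (ps : List ((Int × Int) × β)) (K : Int × Int) (v : β),
    (ps.map (·.1)).Nodup → (K, v) ∈ ps →
    ps.filter (fun p => decide (p.1 = K)) = [(K, v)] := by
  intro ps
  induction ps with
  | nil => intro K v _ h; simp at h
  | cons p ps ih =>
    intro K v hnd hmem
    simp only [List.map_cons, List.nodup_cons] at hnd
    rcases List.mem_cons.1 hmem with h | h
    · subst h
      simp only [List.filter_cons, decide_eq_true_eq]
      rw [if_pos trivial]
      congr 1
      apply List.filter_eq_nil_iff.2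
      intro a ha
      simp only [decide_eq_true_eq]
      intro hK
      exact hnd.1 (by rw [← hK]; exact List.mem_map.2 ⟨a, ha, rfl⟩)
    · have hKmem : K ∈ ps.map (·.1) := List.mem_map.2 ⟨(K, v), h, rfl⟩
      have hne : p.1 ≠ K := fun hK => hnd.1 (by rw [hK]; exact hKmem)
      simp only [List.filter_cons, decide_eq_true_eq]
      rw [if_neg hne]
      exact ih K v hnd.2 h

lemma sum_values_filter (w : PySem.Dict (Int × Int) Int) (hnd : w.keys.Nodup) (K : Int × Int) :
    ((w.items.filter (fun p => decide (p.1 = K))).map (·.2)).sum = w.getD K 0 := by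
  by_cases h : K ∈ w.keys
  · have h' : K ∈ w.items.map (·.1) := by simpa only [PySem.Dict.keys] using h
    obtain ⟨p, hp, hp1⟩ := List.mem_map.1 h'
    obtain ⟨k, v⟩ := p
    simp only at hp1
    subst hp1
    rw [filter_fst_eq_singleton w.items k v (by exact hnd) hp]
    rw [PySem.Dict.getD_of_mem_items w hp hnd]
    simp
  · rw [PySem.Dict.getD_of_not_contains w 0
      (by rw [PySem.Dict.contains_eq_decide_mem_keys]; simpa using h)]
    rw [List.filter_eq_nil_iff.2, List.map_nil, List.sum_nil]
    intro p hp
    simp only [decide_eq_true_eq]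
    intro hK
    exact h (hK ▸ PySem.Dict.mem_keys_of_mem_items w hp)

lemma mod_cond (D m m' x : Int) (hD : 0 < D) (hm0 : 0 ≤ m) (hm : m < D)
    (hm'0 : 0 ≤ m') (hm' : m' < D) :
    ((m + x % D) % D = m') ↔ (m = (m' - x) % D) := by
  have h1 : (m + x % D) % D = (m + x) % D := by
    conv_rhs => rw [Int.add_emod]
    conv_lhs => rw [Int.add_emod, Int.emod_emod_of_dvd _ dvd_rfl]
  rw [h1, mod_shift D m x m' hD hm'0 hm', Int.emod_eq_of_lt hm0 hm]

-- swap a double list sum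
lemma sum_swap_list {α β : Type} (l1 : List α) (l2 : List β) (F : α → β → Int) :
    (l1.map (fun a => (l2.map (F a)).sum)).sum
      = (l2.map (fun b => (l1.map (fun a => F a b)).sum)).sum := by
  induction l1 with
  | nil => simp [List.map_const]
  | cons a l1 ih =>
    simp only [List.map_cons, List.sum_cons, ih, PySem.List.sum_map_add_int]

-- sum of an if-indicator over List.range picks the single matching index
lemma sum_range_indicator (n : Nat) (k0 : Int) (v : Int → Int) (C : Prop) [Decidable C] :
    ((List.range n).map (fun (i : Nat) => if ((i : Int) = k0 ∧ C) then v (i : Int) else 0)).sum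
      = if (0 ≤ k0 ∧ k0 < (n : Int) ∧ C) then v k0 else 0 := by
  induction n with
  | zero =>
    simp only [List.range_zero, List.map_nil, List.sum_nil, Nat.cast_zero]
    rw [if_neg]; rintro ⟨h1, h2, _⟩; omega
  | succ n ih =>
    rw [List.range_succ, List.map_append, List.sum_append, ih]
    simp only [List.map_cons, List.map_nil, List.sum_cons, List.sum_nil, add_zero]
    by_cases hC : C
    · by_cases hk : (n : Int) = k0
      · rw [if_neg (show ¬(0 ≤ k0 ∧ k0 < (n : Int) ∧ C) by rintro ⟨_, h, _⟩; omega),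
          if_pos (show ((n : Int) = k0 ∧ C) from ⟨hk, hC⟩),
          if_pos (show 0 ≤ k0 ∧ k0 < ((n + 1 : Nat) : Int) ∧ C from ⟨by omega, by push_cast; omega, hC⟩), hk]
        ring
      · rw [if_neg (show ¬((n : Int) = k0 ∧ C) by rintro ⟨h, _⟩; exact hk h)]
        by_cases hb : 0 ≤ k0 ∧ k0 < (n : Int)
        · rw [if_pos (show 0 ≤ k0 ∧ k0 < (n : Int) ∧ C from ⟨hb.1, hb.2, hC⟩),
            if_pos (show 0 ≤ k0 ∧ k0 < ((n + 1 : Nat) : Int) ∧ C from ⟨hb.1, by push_cast; omega, hC⟩)]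
          ring
        · rw [if_neg (show ¬(0 ≤ k0 ∧ k0 < (n : Int) ∧ C) by rintro ⟨h1, h2, _⟩; exact hb ⟨h1, h2⟩),
            if_neg (show ¬(0 ≤ k0 ∧ k0 < ((n + 1 : Nat) : Int) ∧ C) by
              rintro ⟨h1, h2, _⟩; push_cast at h2; exact hb ⟨h1, by omega⟩)]
          ring
    · rw [if_neg (show ¬(0 ≤ k0 ∧ k0 < (n : Int) ∧ C) by rintro ⟨_, _, h⟩; exact hC h),
        if_neg (show ¬((n : Int) = k0 ∧ C) by rintro ⟨_, h⟩; exact hC h),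
        if_neg (show ¬(0 ≤ k0 ∧ k0 < ((n + 1 : Nat) : Int) ∧ C) by rintro ⟨_, _, h⟩; exact hC h)]
      ring

lemma sum_filter_map {α : Type} (l : List α) (P : α → Bool) (f : α → Int) :
    ((l.filter P).map f).sum = (l.map (fun a => if P a then f a else 0)).sum := by
  induction l with
  | nil => simp
  | cons a l ih =>
    simp only [List.filter_cons, List.map_cons, List.sum_cons]
    by_cases h : P a
    · rw [if_pos h, if_pos h]; simp only [List.map_cons, List.sum_cons, ih]
    · rw [if_neg (by simpa using h), if_neg (by simpa using h)]; rw [ih]; ring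

lemma emod_add_arg (D u v : Int) : (u + v % D) % D = (u + v) % D := by
  conv_rhs => rw [Int.add_emod]
  conv_lhs => rw [Int.add_emod, Int.emod_emod_of_dvd _ dvd_rfl]

lemma getD_double_fold {α β : Type} (ranges : α → List β) (key : α → β → Int × Int)
    (amt : α → β → Int) :
    ∀ (ps : List α) (d : PySem.Dict (Int × Int) Int) (q : Int × Int),
    (ps.foldl (fun g p => (ranges p).foldl (fun g k => g.modify (key p k) 0 (· + amt p k)) g) d).getD q 0
      = d.getD q 0
        + (ps.map (fun p => (((ranges p).filter (fun k => decide (key p k = q))).map (amt p)).sum)).sum := by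
  intro ps
  induction ps with
  | nil => intro d q; simp
  | cons p ps ih =>
    intro d q
    simp only [List.foldl_cons, List.map_cons, List.sum_cons]
    rw [ih, getD_foldl_modify_sum (key p) (amt p)]
    ring

lemma nodup_double_fold {α β : Type} (ranges : α → List β) (key : α → β → Int × Int)
    (amt : α → β → Int) :
    ∀ (ps : List α) (d : PySem.Dict (Int × Int) Int), d.keys.Nodup →
    (ps.foldl (fun g p => (ranges p).foldl (fun g k => g.modify (key p k) 0 (· + amt p k)) g) d).keys.Nodup := by
  intro ps
  induction ps with
  | nil => intro d h; exact h
  | cons p ps ih =>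
    intro d h
    simp only [List.foldl_cons]
    exact ih _ (PySem.Dict.nodup_keys_foldl_modify_key (ranges p) (key p) 0
      (fun _ k => (· + amt p k)) d h)

lemma keys_bound_double_fold {α β : Type} (ranges : α → List β) (key : α → β → Int × Int)
    (amt : α → β → Int) (B : Int × Int → Prop) :
    ∀ (ps : List α) (d : PySem.Dict (Int × Int) Int),
    (∀ q ∈ d.keys, B q) → (∀ p ∈ ps, ∀ k ∈ ranges p, B (key p k)) →
    ∀ q ∈ (ps.foldl (fun g p => (ranges p).foldl (fun g k => g.modify (key p k) 0 (· + amt p k)) g) d).keys, B q := by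
  intro ps
  induction ps with
  | nil => intro d hd _ q hq; exact hd q hq
  | cons p ps ih =>
    intro d hd hps q hq
    simp only [List.foldl_cons] at hq
    refine ih _ ?_ (fun p' hp' => hps p' (by simp [hp'])) q hq
    intro q' hq'
    rw [PySem.Dict.keys_foldl_modify_key] at hq'
    rcases (PySem.Set.mem_update _ _ _).1 hq' with h | h
    · exact hd q' h
    · obtain ⟨k, hk, rfl⟩ := List.mem_map.1 h
      exact hps p (by simp) k hk

-- ===== the B fold invariant =====

def InvB (D M : Int) (L : List Int) (f : PySem.Dict (Int × Int) Int) : Prop :=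
  f.keys.Nodup ∧
  (∀ q ∈ f.keys, 0 ≤ q.1 ∧ q.1 ≤ M ∧ 0 ≤ q.2 ∧ q.2 < D) ∧
  (∀ j m : Int, 0 ≤ j → j ≤ M → 0 ≤ m → m < D → f.getD (j, m) 0 = cnt D L j m)

lemma InvB_init (D M : Int) (hD : 0 < D) (hM : 0 ≤ M) :
    InvB D M [] (PySem.Dict.ofList [(((0 : Int), (0 : Int)), (1 : Int))]) := by
  have hkeys : (PySem.Dict.ofList [(((0 : Int), (0 : Int)), (1 : Int))]).keys
      = [((0 : Int), (0 : Int))] := by decide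
  refine ⟨by decide, ?_, ?_⟩
  · intro q hq
    rw [hkeys] at hq
    have : q = ((0 : Int), (0 : Int)) := by simpa using hq
    subst this
    exact ⟨le_refl 0, hM, le_refl 0, hD⟩
  · intro j m hj hjM hm hmD
    rw [cnt_nil]
    by_cases h : (j, m) = ((0 : Int), (0 : Int))
    · rw [h]
      rw [if_pos ⟨by simpa using congrArg Prod.fst h, by simpa using congrArg Prod.snd h⟩]
      rfl
    · rw [if_neg (by intro ⟨h1, h2⟩; exact h (by rw [h1, h2]))]
      have hne : ((j, m) : Int × Int) ≠ ((0 : Int), (0 : Int)) := h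
      rw [PySem.Dict.getD_of_not_contains]
      rw [PySem.Dict.contains_eq_decide_mem_keys]
      simp only [decide_eq_false_iff_not]
      rw [hkeys]
      intro hmem
      exact hne (by simpa using hmem)

-- one residue class step of B's fold preserves the invariant
lemma step_B (D M : Int) (hD : 0 < D) (hM : 0 ≤ M) (L : List Int) (r c : Int) (hc : 0 ≤ c)
    (f : PySem.Dict (Int × Int) Int) (hf : InvB D M L f) :
    InvB D M (L ++ List.replicate c.toNat r)
      (f.items.foldl (fun g p =>
        (PySem.List.pyRange 0 (min c (M - p.1.1) + 1) 1).foldl (fun g k =>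
          g.modify (p.1.1 + k, PySem.Int.mod (p.1.2 + k * r) D) 0
            (· + p.2 * pvComb c k)) g)
        (PySem.Dict.ofList [])) := by
  obtain ⟨hnd, hshape, hval⟩ := hf
  simp only [PySem.Int.mod_eq_emod_of_pos hD]
  have hbound : ∀ p ∈ f.items, 0 ≤ p.1.1 ∧ p.1.1 ≤ M ∧ 0 ≤ p.1.2 ∧ p.1.2 < D :=
    fun p hp => hshape p.1 (PySem.Dict.mem_keys_of_mem_items f hp)
  have hkeys0 : (PySem.Dict.ofList ([] : List ((Int × Int) × Int))).keys = [] := rfl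
  refine ⟨?_, ?_, ?_⟩
  · exact nodup_double_fold _ _ _ f.items _ (by rw [hkeys0]; exact List.nodup_nil)
  · refine keys_bound_double_fold _ _ _ (fun q => 0 ≤ q.1 ∧ q.1 ≤ M ∧ 0 ≤ q.2 ∧ q.2 < D)
      f.items _ (by rw [hkeys0]; intro q hq; simp at hq) ?_
    intro p hp k hk
    obtain ⟨hk0, hk1⟩ := PySem.List.mem_pyRange_one.1 hk
    obtain ⟨b1, b2, b3, b4⟩ := hbound p hp
    exact ⟨by omega, by omega, Int.emod_nonneg _ (by omega), Int.emod_lt_of_pos _ hD⟩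
  · intro j m hj hjM hm hmD
    rw [getD_double_fold]
    have hempty : (PySem.Dict.ofList ([] : List ((Int × Int) × Int))).getD (j, m) 0 = 0 := rfl
    rw [hempty, zero_add]
    -- per-item filtered sum in closed form
    have hS : ∀ p ∈ f.items,
        (((PySem.List.pyRange 0 (min c (M - p.1.1) + 1) 1).filter
            (fun k => decide ((p.1.1 + k, (p.1.2 + k * r) % D) = (j, m)))).map
          (fun k => p.2 * pvComb c k)).sum
        = if (0 ≤ j - p.1.1 ∧ j - p.1.1 ≤ c ∧ (p.1.2 + (j - p.1.1) * r) % D = m)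
          then p.2 * pvComb c (j - p.1.1) else 0 := by
      intro p hp
      obtain ⟨b1, b2, b3, b4⟩ := hbound p hp
      rw [sum_filter_map, PySem.List.pyRange_one, List.map_map]
      have hcg : ∀ i ∈ List.range (min c (M - p.1.1) + 1 - 0).toNat,
          (((fun a => if (decide ((p.1.1 + a, (p.1.2 + a * r) % D) = (j, m))) then p.2 * pvComb c a else 0)
            ∘ fun k : Nat => (0 : Int) + (k : Int)) i)
          = (fun (i : Nat) => if ((i : Int) = j - p.1.1 ∧ (p.1.2 + (j - p.1.1) * r) % D = m)
              then (fun k : Int => p.2 * pvComb c k) (i : Int) else 0) i := by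
        intro i _
        simp only [Function.comp, zero_add, decide_eq_true_eq]
        refine if_congr ?_ rfl rfl
        rw [Prod.ext_iff]
        simp only
        constructor
        · rintro ⟨e1, e2⟩
          have : (i : Int) = j - p.1.1 := by omega
          rw [this] at e2 ⊢
          exact ⟨rfl, e2⟩
        · rintro ⟨e1, e2⟩
          rw [e1]
          exact ⟨by ring, e2⟩
      rw [List.map_congr_left hcg,
        sum_range_indicator (min c (M - p.1.1) + 1 - 0).toNat (j - p.1.1)
          (fun k : Int => p.2 * pvComb c k) ((p.1.2 + (j - p.1.1) * r) % D = m)]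
      have hcast : (((min c (M - p.1.1) + 1 - 0).toNat : Nat) : Int) = min c (M - p.1.1) + 1 := by
        omega
      rw [hcast]
      refine if_congr ?_ rfl rfl
      constructor
      · rintro ⟨e1, e2, e3⟩
        exact ⟨e1, by omega, e3⟩
      · rintro ⟨e1, e2, e3⟩
        exact ⟨e1, by omega, e3⟩
    rw [List.map_congr_left hS]
    -- equate with the binomial convolution over f's values
    have hT : (f.items.map (fun p =>
        if (0 ≤ j - p.1.1 ∧ j - p.1.1 ≤ c ∧ (p.1.2 + (j - p.1.1) * r) % D = m)
          then p.2 * pvComb c (j - p.1.1) else 0)).sum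
        = ((List.range (c.toNat + 1)).map (fun (kN : Nat) =>
            f.getD (j - (kN : Int), (m - (kN : Int) * r) % D) 0 * pvComb c (kN : Int))).sum := by
      have hgetD : ∀ kN : Nat,
          f.getD (j - (kN : Int), (m - (kN : Int) * r) % D) 0 * pvComb c (kN : Int)
          = (f.items.map (fun p =>
              if p.1 = (j - (kN : Int), (m - (kN : Int) * r) % D)
                then p.2 * pvComb c (kN : Int) else 0)).sum := by
        intro kN
        rw [← sum_values_filter f hnd (j - (kN : Int), (m - (kN : Int) * r) % D),
          ← List.sum_map_mul_right, sum_filter_map]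
        apply congrArg
        apply List.map_congr_left
        intro p _
        by_cases h : p.1 = (j - (kN : Int), (m - (kN : Int) * r) % D)
        · rw [if_pos (by simpa using h), if_pos h]
        · rw [if_neg (by simpa using h), if_neg h]
      rw [List.map_congr_left (fun kN _ => hgetD kN), sum_swap_list]
      apply congrArg
      apply List.map_congr_left
      intro p hp
      obtain ⟨b1, b2, b3, b4⟩ := hbound p hp
      have hcg2 : ∀ kN ∈ List.range (c.toNat + 1),
          (if p.1 = (j - (kN : Int), (m - (kN : Int) * r) % D) then p.2 * pvComb c (kN : Int) else 0)
          = (fun (i : Nat) => if ((i : Int) = j - p.1.1 ∧ p.1.2 = (m - (j - p.1.1) * r) % D)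
              then (fun k : Int => p.2 * pvComb c k) (i : Int) else 0) kN := by
        intro kN _
        refine if_congr ?_ rfl rfl
        rw [Prod.ext_iff]
        simp only
        constructor
        · rintro ⟨e1, e2⟩
          have : (kN : Int) = j - p.1.1 := by omega
          rw [this] at e2
          exact ⟨this, e2⟩
        · rintro ⟨e1, e2⟩
          rw [← e1] at e2
          exact ⟨by omega, e2⟩
      rw [List.map_congr_left hcg2,
        sum_range_indicator (c.toNat + 1) (j - p.1.1)
          (fun k : Int => p.2 * pvComb c k) (p.1.2 = (m - (j - p.1.1) * r) % D)]
      have hcast2 : ((c.toNat + 1 : Nat) : Int) = c + 1 := by omega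
      rw [hcast2]
      refine if_congr ?_ rfl rfl
      have hresid : ((p.1.2 + (j - p.1.1) * r) % D = m) ↔ (p.1.2 = (m - (j - p.1.1) * r) % D) := by
        rw [← emod_add_arg D p.1.2 ((j - p.1.1) * r)]
        exact mod_cond D p.1.2 m ((j - p.1.1) * r) hD b3 b4 hm hmD
      constructor
      · rintro ⟨e1, e2, e3⟩
        exact ⟨e1, by omega, hresid.1 e3⟩
      · rintro ⟨e1, e2, e3⟩
        exact ⟨e1, by omega, hresid.2 e3⟩
    rw [hT]
    -- replace getD by cnt and pvComb by choose, then close with cnt_class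
    rw [cnt_class D hD r c.toNat L j m hm hmD]
    apply congrArg
    apply List.map_congr_left
    intro kN hkN
    have hkc : kN ≤ c.toNat := by
      have := List.mem_range.1 hkN; omega
    have hcomb : pvComb c (kN : Int) = ((c.toNat.choose kN : Nat) : Int) := by
      rw [show c = ((c.toNat : Nat) : Int) from by omega]
      exact pvComb_eq_choose c.toNat kN hkc
    rw [hcomb]
    by_cases hjk : 0 ≤ j - (kN : Int)
    · rw [hval (j - (kN : Int)) ((m - (kN : Int) * r) % D) hjk (by omega)
        (Int.emod_nonneg _ (by omega)) (Int.emod_lt_of_pos _ hD)]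
    · rw [cnt_neg D L _ _ (by omega)]
      rw [PySem.Dict.getD_of_not_contains f 0 ?_]
      · rw [PySem.Dict.contains_eq_decide_mem_keys]
        simp only [decide_eq_false_iff_not]
        intro hmem
        have := (hshape _ hmem).1
        simp only at this
        omega

-- B's outer fold over the class list
lemma fold_B (D M : Int) (hD : 0 < D) (hM : 0 ≤ M) :
    ∀ (ics : List (Int × Int)), (∀ rc ∈ ics, 0 ≤ rc.2) →
    ∀ (L : List Int) (f : PySem.Dict (Int × Int) Int), InvB D M L f →
    InvB D M (L ++ ics.flatMap (fun rc => List.replicate rc.2.toNat rc.1))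
      (ics.foldl (fun f rc =>
        f.items.foldl (fun g p =>
          (PySem.List.pyRange 0 (min rc.2 (M - p.1.1) + 1) 1).foldl (fun g k =>
            g.modify (p.1.1 + k, PySem.Int.mod (p.1.2 + k * rc.1) D) 0
              (· + p.2 * pvComb rc.2 k)) g)
          (PySem.Dict.ofList [])) f) := by
  intro ics
  induction ics with
  | nil => intro _ L f hf; simpa using hf
  | cons rc ics ih =>
    intro hnn L f hf
    simp only [List.foldl_cons, List.flatMap_cons]
    have h1 := step_B D M hD hM L rc.1 rc.2 (hnn rc (by simp)) f hf
    have h2 := ih (fun p hp => hnn p (by simp [hp])) _ _ h1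
    simpa [List.append_assoc] using h2

lemma count_flat_aux (rs : List Int) (a : Int) :
    ∀ keys : List Int, keys.Nodup →
    (keys.flatMap (fun k => List.replicate (rs.count k) k)).count a
      = if a ∈ keys then rs.count a else 0 := by
  intro keys
  induction keys with
  | nil => simp
  | cons k keys ih =>
    intro hnd
    rw [List.flatMap_cons, List.count_append, ih (List.nodup_cons.1 hnd).2, List.count_replicate]
    by_cases hak : k = a
    · subst hak
      rw [if_pos (by simp), if_neg (List.nodup_cons.1 hnd).1, if_pos (by simp)]
      omega
    · rw [if_neg (by simpa using hak)]
      by_cases ham : a ∈ keys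
      · rw [if_pos ham, if_pos (by simp [ham])]
        omega
      · rw [if_neg ham, if_neg (by simp [Ne.symm hak, ham])]

-- the grouped class list of B is a permutation of the residue list
lemma flat_perm (rs : List Int) :
    (((PySem.Set.ofList rs).map (fun k => (k, (rs.count k : Int)))).flatMap
      (fun rc => List.replicate rc.2.toNat rc.1)).Perm rs := by
  rw [List.flatMap_map]
  simp only [Int.toNat_natCast]
  rw [List.perm_iff_count]
  intro a
  rw [count_flat_aux rs a (PySem.Set.ofList rs) (PySem.Set.nodup_ofList rs)]
  by_cases h : a ∈ rs
  · rw [if_pos ((PySem.Set.mem_ofList rs a).2 h)]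
  · rw [if_neg (fun hh => h ((PySem.Set.mem_ofList rs a).1 hh)), eq_comm, List.count_eq_zero]
    exact h

-- ===== VERDICT (by name: the statement is the Claim_ definition above) =====
theorem divisible_group_sums_spec : Claim_equal_divisible_group_sums := by
  unfold Claim_equal_divisible_group_sums Spec_divisible_group_sums
  intro nums M D hdom hpre
  unfold divisible_group_sums divisible_group_sums_alt
  by_cases h1 : nums = []
  · rw [if_pos h1, if_pos h1]
  rw [if_neg h1, if_neg h1]
  by_cases h2 : D = 0
  · rw [if_pos h2, if_pos h2]
  rw [if_neg h2, if_neg h2]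
  by_cases h3 : M < 0 ∨ (nums.length : Int) < M
  · rw [if_pos h3, if_pos h3]
  rw [if_neg h3, if_neg h3]
  push_neg at h3
  obtain ⟨hM0, hMlen⟩ := h3
  have hD : 0 < D := by
    rcases hpre with h | ⟨hD0, h⟩
    · exact absurd h h1
    rcases h with h | h | h
    · exact h
    · omega
    · omega
  -- A's side: the table after the fold is the cnt table
  have hA : pvGet2 ((nums.foldl (fun dp num =>
      (PySem.List.pyRange M 0 (-1)).foldl (fun dp2 j =>
        (PySem.List.pyRange 0 D 1).foldl (fun dp3 k =>
          pvSet2 dp3 j k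
            (pvGet2 dp3 j k + pvGet2 dp3 (j - 1)
              (PySem.Int.mod (k - PySem.Int.mod (PySem.Int.mod num D + D) D + D) D))) dp2) dp)
      (pvSet2 (List.replicate (M.toNat + 1) (List.replicate D.toNat (0 : Int))) 0 0 1))) M 0
      = cnt D nums M 0 := by
    obtain ⟨Mn, rfl⟩ : ∃ n : Nat, M = (n : Int) := ⟨M.toNat, (Int.toNat_of_nonneg hM0).symm⟩
    simp only [Int.toNat_natCast]
    rw [A_init Mn D hD, fold_A D hD Mn nums [], List.nil_append, tbl_read D hD Mn nums]
  rw [hA]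
  -- B's side
  set rs : List Int := nums.map (fun x => PySem.Int.mod x D) with hrs
  have hcounts : nums.foldl (fun d x => d.modify (PySem.Int.mod x D) 0 (· + 1)) PySem.Dict.empty
      = PySem.Dict.counter rs := by
    rw [PySem.Dict.counter_eq_foldl, hrs, List.foldl_map]
  simp only [hcounts, PySem.Dict.items_counter]
  set ics : List (Int × Int) := (PySem.Set.ofList rs).map (fun k => (k, (rs.count k : Int)))
    with hics
  have hnn : ∀ rc ∈ ics, 0 ≤ rc.2 := by
    intro rc hrc
    rw [hics] at hrc
    obtain ⟨k, _, rfl⟩ := List.mem_map.1 hrc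
    positivity
  have hinv := fold_B D M hD hM0 ics hnn [] _ (InvB_init D M hD hM0)
  rw [List.nil_append] at hinv
  rw [hinv.2.2 M 0 hM0 (le_refl M) (le_refl 0) hD]
  -- chain the three cnt identities
  have hperm := cnt_perm D hD (flat_perm rs) M 0 (le_refl 0) hD
  rw [hperm]
  have hres : rs = nums.map (fun x => x % D) := by
    rw [hrs]
    apply List.map_congr_left
    intro x _
    exact PySem.Int.mod_eq_emod_of_pos hD
  rw [hres, cnt_map_res]

theorem divisible_group_sums_raises : Claim_raises_divisible_group_sums := by
  unfold Claim_raises_divisible_group_sums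
  constructor
  · intro nums M D _ hr hp
    obtain ⟨hne, hDneg, hM0, hMlen⟩ := hr
    rcases hp with h | ⟨hD0, h | h | h⟩
    · exact hne h
    · omega
    · omega
    · omega
  · refine ⟨by decide, by decide, by decide⟩

-- self-check: the raise witness really is in scope of the claim (projection of the theorem above)
theorem divisible_group_sums_raises_witness :
    divisible_group_sums_alt (pvRaiseWitness_divisible_group_sums.1)
      (pvRaiseWitness_divisible_group_sums.2.1) (pvRaiseWitness_divisible_group_sums.2.2)
      = pvRaiseWitnessOut_divisible_group_sums :=
  divisible_group_sums_raises.2.2.2
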